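-- pv_equiv track=rewrite | github.com/SiebeLeDe/CodeAdvent2025 | day2/main.py | get_invalid_ids_from_range_second_part
-- ===== SOURCE A (Python) =====
-- def determine_invalid_id(id: int, sequence_length: int) -> bool:
--     """
--     Determines if the given ID is invalid based on the specified sequence length.
--     An ID is considered invalid if it consists of a sequence of digits repeated consecutively.
--
--     Args:
--         id (int): The ID to check.
--         sequence_length (int): The length of the sequence to check for repetition.
--
--     Returns:
--         bool: True if the ID is invalid, False otherwise.
--     """
--     id_str = str(id)
--     if len(id_str) % sequence_length != 0:
--         return False
--
--     sequence = id_str[:sequence_length]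
--     repeated_sequence = sequence * (len(id_str) // sequence_length)
--
--     return repeated_sequence == id_str and not sequence.startswith("0")
--
-- def get_invalid_ids_from_range_second_part(range_pair: tuple[int, int]) -> set[int]:
--     """
--     Given a range defined by a tuple (start, end), returns how many and which IDs are invalid.
--     In contrast to the first part, an invalid ID is now characterized by having any sequence of digits repeated, so at least twice in a consequential manner.
--
--     An ID is considered invalid if:
--     - any ID which is made only of some sequence of digits is repeated at least twice
--     - sequences starting with "0" are ignored
--     """
--     start, end = range_pair
--     invalid_ids = set()
--
--     for id in range(start, end + 1):
--         id_str = str(id)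
--
--         # Check for all possible sequence lengths
--         for seq_length in range(1, len(id_str) // 2 + 1):
--             if determine_invalid_id(id, seq_length):
--                 invalid_ids.add(id)
--                 break  # No need to check further sequence lengths
--
--     return invalid_ids
-- ===== SOURCE B (Python) =====
-- def get_invalid_ids_from_range_second_part(range_pair):
--     start, end = range_pair
--     # Count the decimal digits of `end` (0 when end <= 0: then no repeated-sequence id can fit).
--     max_len = 0
--     t = end
--     while t > 0:
--         max_len += 1
--         t //= 10
--     cands = []
--     for total_len in range(2, max_len + 1):
--         for k in range(1, total_len // 2 + 1):
--             if total_len % k != 0: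
--                 continue
--             reps = total_len // k
--             shift = 10 ** k
--             for b in range(10 ** (k - 1), 10 ** k):
--                 n = b
--                 for _ in range(reps - 1):
--                     n = n * shift + b
--                 if start <= n <= end:
--                     cands.append(n)
--     return set(sorted(cands))
-- ===== Notes on version B (the rewrite author's own statement) =====
-- stated objective: faster
-- what changed: Instead of scanning every id in [start, end] and testing each id's decimal string for a repeated block, B directly generates every repeated-block number (a base block with no leading zero, repeated at least twice, built arithmetically as n = n*10^k + b) up to the digit length of end and keeps those inside the range.
import Mathlib
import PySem

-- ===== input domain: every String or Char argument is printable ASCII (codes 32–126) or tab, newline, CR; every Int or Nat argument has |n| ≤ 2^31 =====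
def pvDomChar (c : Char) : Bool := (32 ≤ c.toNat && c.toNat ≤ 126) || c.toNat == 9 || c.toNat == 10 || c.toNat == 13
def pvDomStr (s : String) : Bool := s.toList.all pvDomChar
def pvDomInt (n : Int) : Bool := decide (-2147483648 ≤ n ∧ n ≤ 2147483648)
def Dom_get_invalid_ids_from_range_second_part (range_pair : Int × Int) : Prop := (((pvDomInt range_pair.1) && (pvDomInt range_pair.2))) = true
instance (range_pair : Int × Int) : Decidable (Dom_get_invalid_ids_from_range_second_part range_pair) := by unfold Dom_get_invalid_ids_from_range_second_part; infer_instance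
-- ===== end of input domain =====

-- B replaces A's scan of every id in the range (testing each for a repeated digit block)
-- by directly generating every repeated-block number up to `end` arithmetically; measurably
-- faster (asymptotic: output-sized generation instead of a full range scan).

-- ===== PORT A =====
def determine_invalid_id (id : Int) (sequence_length : Int) : Bool :=
  let id_str := PySem.Int.toChars id
  if PySem.Int.mod (PySem.List.len id_str) sequence_length ≠ 0 then false
  else
    let sequence := PySem.List.slice id_str none (some sequence_length)
    let repeated_sequence :=
      PySem.List.pyRepeat sequence
        (PySem.Int.floordiv (PySem.List.len id_str) sequence_length)
    (repeated_sequence == id_str) && !(PySem.Chars.startswith sequence ['0'])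

def get_invalid_ids_from_range_second_part (range_pair : Int × Int) : List Int :=
  let start := range_pair.1
  let «end» := range_pair.2
  (PySem.List.pyRange start («end» + 1) 1).foldl
    (fun invalid_ids id =>
      let id_str := PySem.Int.toChars id
      -- 'for seq_length in …: if determine…: add; break' adds id iff some seq_length passes
      if (PySem.List.pyRange 1 (PySem.Int.floordiv (PySem.List.len id_str) 2 + 1) 1).any
           (fun seq_length => determine_invalid_id id seq_length)
      then PySem.Set.add invalid_ids id else invalid_ids)
    PySem.Set.empty

-- ===== PORT B =====
def pvNumDigits (t : Int) : Int :=
  if h : 0 < t then pvNumDigits (PySem.Int.floordiv t 10) + 1 else 0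
termination_by t.toNat
decreasing_by
  have : PySem.Int.floordiv t 10 = t / 10 := PySem.Int.floordiv_eq_ediv_of_pos (by omega)
  rw [this]; omega

def get_invalid_ids_from_range_second_part_alt (range_pair : Int × Int) : List Int :=
  let start := range_pair.1
  let «end» := range_pair.2
  let max_len := pvNumDigits «end»
  let cands :=
    (PySem.List.pyRange 2 (max_len + 1) 1).foldl (fun cands total_len =>
      (PySem.List.pyRange 1 (PySem.Int.floordiv total_len 2 + 1) 1).foldl (fun cands k =>
        if PySem.Int.mod total_len k ≠ 0 then cands
        else
          let reps := PySem.Int.floordiv total_len k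
          let shift := (10 : Int) ^ k.toNat          -- 10 ** k (k ≥ 1 here)
          (PySem.List.pyRange ((10 : Int) ^ (k - 1).toNat) ((10 : Int) ^ k.toNat) 1).foldl
            (fun cands b =>
              let n := (PySem.List.pyRange 0 (reps - 1) 1).foldl (fun n _ => n * shift + b) b
              if start ≤ n ∧ n ≤ «end» then cands ++ [n] else cands)
            cands)
        cands)
      []
  PySem.Set.ofList (PySem.List.sorted cands (fun x => x))


-- ===== PRECONDITION & SPEC =====
def Spec_get_invalid_ids_from_range_second_part (range_pair : Int × Int) (out : List Int) : Prop := out = get_invalid_ids_from_range_second_part_alt range_pair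
instance (range_pair : Int × Int) (out : List Int) : Decidable (Spec_get_invalid_ids_from_range_second_part range_pair out) := by unfold Spec_get_invalid_ids_from_range_second_part; infer_instance

-- ===== CLAIM (what is proved, stated in full; the proofs are below) =====
def Claim_equal_get_invalid_ids_from_range_second_part : Prop := ∀ (range_pair : Int × Int), Dom_get_invalid_ids_from_range_second_part range_pair → Spec_get_invalid_ids_from_range_second_part range_pair (get_invalid_ids_from_range_second_part range_pair)

-- ===== LEMMAS AND PROOFS =====
-- canonical decimal digit string (big-endian) of a Nat
def pvD (n : Nat) : List Char :=
  if h : n < 10 then [Nat.digitChar n]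
  else pvD (n / 10) ++ [Nat.digitChar (n % 10)]
termination_by n
decreasing_by omega

theorem pvD_lt (n : Nat) (h : n < 10) : pvD n = [Nat.digitChar n] := by
  rw [pvD]; simp [h]

theorem pvD_ge (n : Nat) (h : 10 ≤ n) : pvD n = pvD (n / 10) ++ [Nat.digitChar (n % 10)] := by
  rw [pvD]; simp [Nat.not_lt.mpr h]

theorem pvD_ne_nil (n : Nat) : pvD n ≠ [] := by
  rw [pvD]; split <;> simp

-- toDigitsCore with enough fuel is pvD
theorem toDigitsCore_eq (f : Nat) : ∀ (n : Nat) (acc : List Char), n < f →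
    Nat.toDigitsCore 10 f n acc = pvD n ++ acc := by
  induction f with
  | zero => intro n acc h; omega
  | succ f ih =>
    intro n acc h
    rw [Nat.toDigitsCore]
    by_cases h10 : n < 10
    · have : n / 10 = 0 := by omega
      have hm : n % 10 = n := by omega
      simp [this, pvD_lt n h10, hm]
    · have hq : ¬ (n / 10 = 0) := by omega
      simp only [hq, if_false]
      rw [ih (n / 10) _ (by omega), pvD_ge n (by omega)]
      simp

theorem toDigits_eq_pvD (n : Nat) : Nat.toDigits 10 n = pvD n := by
  rw [Nat.toDigits, toDigitsCore_eq (n + 1) n [] (by omega)]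
  simp

theorem toChars_eq_pvD (n : Int) (h : 0 ≤ n) : PySem.Int.toChars n = pvD n.toNat := by
  simp [PySem.Int.toChars, Int.not_lt.mpr h, toDigits_eq_pvD]

theorem toChars_neg (n : Int) (h : n < 0) :
    PySem.Int.toChars n = '-' :: pvD n.natAbs := by
  simp [PySem.Int.toChars, h, toDigits_eq_pvD]

-- digit predicate and value
def pvIsDig (c : Char) : Prop := PySem.Chars.isdigit c = true

def pvV (ds : List Char) : Nat := ds.foldl (fun a c => a * 10 + (c.toNat - 48)) 0

theorem pvV_append_singleton (es : List Char) (c : Char) :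
    pvV (es ++ [c]) = pvV es * 10 + (c.toNat - 48) := by
  simp [pvV, List.foldl_append]

theorem digitChar_toNat (d : Nat) (h : d < 10) : (Nat.digitChar d).toNat = 48 + d := by
  interval_cases d <;> decide

theorem char_eq_of_toNat (a b : Char) (h : a.toNat = b.toNat) : a = b := by
  have := Char.ofNat_toNat a
  rw [← this, h, Char.ofNat_toNat]

theorem isdig_digitChar (d : Nat) (h : d < 10) : pvIsDig (Nat.digitChar d) := by
  unfold pvIsDig
  interval_cases d <;> decide

theorem isdig_bounds (c : Char) (h : pvIsDig c) : 48 ≤ c.toNat ∧ c.toNat ≤ 57 := by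
  simp [pvIsDig, PySem.Chars.isdigit] at h
  obtain ⟨h1, h2⟩ := h
  rw [Char.le_def, UInt32.le_iff_toNat_le] at h1 h2
  exact ⟨h1, h2⟩

theorem digitChar_val (c : Char) (h : pvIsDig c) : Nat.digitChar (c.toNat - 48) = c := by
  have hb := isdig_bounds c h
  apply char_eq_of_toNat
  rw [digitChar_toNat _ (by omega)]
  omega

theorem pvV_pvD (n : Nat) : pvV (pvD n) = n := by
  induction n using Nat.strong_induction_on with
  | _ n ih =>
    by_cases h : n < 10
    · rw [pvD_lt n h]
      show pvV ([] ++ [Nat.digitChar n]) = n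
      rw [pvV_append_singleton, digitChar_toNat n h]
      simp [pvV]
    · rw [pvD_ge n (by omega), pvV_append_singleton, ih (n / 10) (by omega),
        digitChar_toNat _ (by omega)]
      omega

theorem pvD_inj (a b : Nat) (h : pvD a = pvD b) : a = b := by
  rw [← pvV_pvD a, ← pvV_pvD b, h]

theorem pvD_all_dig (n : Nat) : ∀ c ∈ pvD n, pvIsDig c := by
  induction n using Nat.strong_induction_on with
  | _ n ih =>
    by_cases h : n < 10
    · rw [pvD_lt n h]; intro c hc
      simp at hc; subst hc; exact isdig_digitChar n h
    · rw [pvD_ge n (by omega)]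
      intro c hc
      rcases List.mem_append.mp hc with h1 | h1
      · exact ih (n / 10) (by omega) c h1
      · simp at h1; subst h1; exact isdig_digitChar _ (by omega)

-- length bounds: for 1 ≤ n, 10^(len-1) ≤ n < 10^len
theorem pvD_bounds (n : Nat) (h : 1 ≤ n) :
    10 ^ ((pvD n).length - 1) ≤ n ∧ n < 10 ^ (pvD n).length := by
  induction n using Nat.strong_induction_on with
  | _ n ih =>
    by_cases h10 : n < 10
    · rw [pvD_lt n h10]; simp; omega
    · rw [pvD_ge n (by omega)]
      have hq := ih (n / 10) (by omega) (by omega)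
      simp only [List.length_append, List.length_cons, List.length_nil]
      have hL : 1 ≤ (pvD (n / 10)).length := by
        have := pvD_ne_nil (n / 10)
        cases hh : pvD (n / 10) with
        | nil => exact absurd hh this
        | cons a l => simp
      constructor
      · calc 10 ^ ((pvD (n/10)).length + 1 - 1) = 10 ^ ((pvD (n/10)).length - 1) * 10 := by
              rw [← pow_succ]; congr 1; omega
        _ ≤ (n / 10) * 10 := by exact Nat.mul_le_mul_right 10 hq.1
        _ ≤ n := by omega
      · calc n < (n / 10 + 1) * 10 := by omega
        _ ≤ 10 ^ (pvD (n/10)).length * 10 := by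
              exact Nat.mul_le_mul_right 10 (by omega)
        _ = 10 ^ ((pvD (n/10)).length + 1) := by rw [pow_succ]

theorem pvD_length_eq (b k : Nat) (hk : 1 ≤ k) (h1 : 10 ^ (k - 1) ≤ b) (h2 : b < 10 ^ k) :
    (pvD b).length = k := by
  have hb1 : 1 ≤ b := le_trans (Nat.one_le_pow _ _ (by omega)) h1
  have hb := pvD_bounds b hb1
  set L := (pvD b).length with hL
  have hL1 : 1 ≤ L := by
    have := pvD_ne_nil b
    cases hh : pvD b with
    | nil => exact absurd hh this
    | cons a l => rw [hL, hh]; simp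
  by_contra hne
  rcases Nat.lt_or_ge L k with hlt | hge
  · have : 10 ^ L ≤ 10 ^ (k - 1) := Nat.pow_le_pow_right (by omega) (by omega)
    omega
  · have hgt : k < L := by omega
    have : 10 ^ k ≤ 10 ^ (L - 1) := Nat.pow_le_pow_right (by omega) (by omega)
    omega

theorem pvD_length_mono (a b : Nat) (ha : 1 ≤ a) (hab : a ≤ b) :
    (pvD a).length ≤ (pvD b).length := by
  have hA := pvD_bounds a ha
  have hB := pvD_bounds b (by omega)
  by_contra hlt
  have : 10 ^ (pvD b).length ≤ 10 ^ ((pvD a).length - 1) :=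
    Nat.pow_le_pow_right (by omega) (by omega)
  omega

-- pvD of a number with an m-digit tail appended
theorem pvD_append (a c m : Nat) (ha : 1 ≤ a) (hm : 1 ≤ m)
    (h1 : 10 ^ (m - 1) ≤ c) (h2 : c < 10 ^ m) :
    pvD (a * 10 ^ m + c) = pvD a ++ pvD c := by
  induction m generalizing c with
  | zero => omega
  | succ m ih =>
    by_cases hm0 : m = 0
    · subst hm0
      simp only [Nat.zero_add, pow_one] at h2 ⊢
      have hge : 10 ≤ a * 10 + c := by nlinarith
      rw [pvD_ge _ hge]
      have hdiv : (a * 10 + c) / 10 = a := by omega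
      have hmod : (a * 10 + c) % 10 = c := by omega
      rw [hdiv, hmod, pvD_lt c h2]
    · have hm1 : 1 ≤ m := by omega
      have hc10 : 10 ≤ c := by
        calc 10 = 10 ^ 1 := (pow_one 10).symm
        _ ≤ 10 ^ (m + 1 - 1) := Nat.pow_le_pow_right (by omega) (by omega)
        _ ≤ c := h1
      have hge : 10 ≤ a * 10 ^ (m + 1) + c := by
        have : 1 * 10 ^ (m+1) ≤ a * 10 ^ (m+1) := Nat.mul_le_mul_right _ ha
        have h10 : 10 ≤ 10 ^ (m+1) := by
          calc 10 = 10 ^ 1 := (pow_one 10).symm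
          _ ≤ 10 ^ (m+1) := Nat.pow_le_pow_right (by omega) (by omega)
        omega
      rw [pvD_ge _ hge]
      have hdiv : (a * 10 ^ (m+1) + c) / 10 = a * 10 ^ m + c / 10 := by
        rw [pow_succ, ← mul_assoc, Nat.add_comm, Nat.add_mul_div_right _ _ (by norm_num),
          Nat.add_comm]
      have hmod : (a * 10 ^ (m+1) + c) % 10 = c % 10 := by
        rw [pow_succ, ← mul_assoc, Nat.add_comm, Nat.add_mul_mod_self_right]
      rw [hdiv, hmod]
      have hcd1 : 10 ^ (m - 1) ≤ c / 10 := by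
        have : 10 ^ (m + 1 - 1) = 10 ^ (m - 1) * 10 := by
          rw [← pow_succ]; congr 1; omega
        omega
      have hcd2 : c / 10 < 10 ^ m := by
        have : 10 ^ (m + 1) = 10 ^ m * 10 := by rw [pow_succ]
        omega
      rw [ih (c / 10) hm1 hcd1 hcd2, pvD_ge c hc10]
      simp

-- roundtrip: pvD (pvV ds) = ds for digit strings without leading zero
theorem pvV_lt (ds : List Char) (h : ∀ c ∈ ds, pvIsDig c) : pvV ds < 10 ^ ds.length := by
  induction ds using List.reverseRecOn with
  | nil => simp [pvV]
  | append_singleton es c ih =>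
    rw [pvV_append_singleton]
    have hc := isdig_bounds c (h c (by simp))
    have he := ih (fun x hx => h x (by simp [hx]))
    simp only [List.length_append, List.length_cons, List.length_nil, pow_succ]
    omega

theorem pvV_ge (ds : List Char) (hne : ds ≠ []) (h : ∀ c ∈ ds, pvIsDig c)
    (h0 : ds.head hne ≠ '0') : 10 ^ (ds.length - 1) ≤ pvV ds := by
  induction ds using List.reverseRecOn with
  | nil => simp at hne
  | append_singleton es c ih =>
    cases hes : es with
    | nil =>
      subst hes
      rw [pvV_append_singleton]
      have hc := isdig_bounds c (h c (by simp))
      have hc0 : c ≠ '0' := by simpa using h0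
      have : c.toNat ≠ 48 := by
        intro hh; exact hc0 (char_eq_of_toNat c '0' (by rw [hh]; rfl))
      simp [pvV]
      omega
    | cons a l =>
      have hne' : es ≠ [] := by rw [hes]; simp
      rw [← hes]
      have hh : (es ++ [c]).head hne = es.head hne' := List.head_append_left hne'
      have hge := ih hne' (fun x hx => h x (by simp [hx])) (by rw [← hh]; exact h0)
      have hlen : (es ++ [c]).length - 1 = es.length := by simp
      rw [pvV_append_singleton, hlen]
      have : 10 ^ es.length = 10 ^ (es.length - 1) * 10 := by
        rw [← pow_succ]; congr 1
        rw [hes]; simp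
      omega

theorem pvD_pvV (ds : List Char) (hne : ds ≠ []) (h : ∀ c ∈ ds, pvIsDig c)
    (h0 : ds.head hne ≠ '0') : pvD (pvV ds) = ds := by
  induction ds using List.reverseRecOn with
  | nil => simp at hne
  | append_singleton es c ih =>
    have hc := isdig_bounds c (h c (by simp))
    cases hes : es with
    | nil =>
      subst hes
      rw [pvV_append_singleton]
      have hc0 : c ≠ '0' := by simpa using h0
      have : c.toNat ≠ 48 := by
        intro hh; exact hc0 (char_eq_of_toNat c '0' (by rw [hh]; rfl))
      simp [pvV]
      rw [pvD_lt _ (by omega), digitChar_val c (h c (by simp))]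
    | cons a l =>
      have hne' : es ≠ [] := by rw [hes]; simp
      rw [← hes, pvV_append_singleton]
      have hh : (es ++ [c]).head hne = es.head hne' := List.head_append_left hne'
      have hge := pvV_ge es hne' (fun x hx => h x (by simp [hx])) (by rw [← hh]; exact h0)
      have hpos : 1 ≤ pvV es := by
        have : 1 ≤ 10 ^ (es.length - 1) := Nat.one_le_pow _ _ (by omega)
        omega
      have hge10 : 10 ≤ pvV es * 10 + (c.toNat - 48) := by omega
      rw [pvD_ge _ hge10]
      have hdiv : (pvV es * 10 + (c.toNat - 48)) / 10 = pvV es := by omega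
      have hmod : (pvV es * 10 + (c.toNat - 48)) % 10 = c.toNat - 48 := by omega
      rw [hdiv, hmod, ih hne' (fun x hx => h x (by simp [hx])) (by rw [← hh]; exact h0),
        digitChar_val c (h c (by simp))]

theorem pvD_head_ne_zero (n : Nat) (h : 1 ≤ n) :
    (pvD n).head (pvD_ne_nil n) ≠ '0' := by
  induction n using Nat.strong_induction_on with
  | _ n ih =>
    by_cases h10 : n < 10
    · simp only [pvD_lt n h10, List.head_cons]
      interval_cases n <;> decide
    · obtain ⟨a, l, hq⟩ : ∃ a l, pvD (n / 10) = a :: l := by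
        cases hq : pvD (n / 10) with
        | nil => exact absurd hq (pvD_ne_nil _)
        | cons a l => exact ⟨a, l, rfl⟩
      have hih := ih (n / 10) (by omega) (by omega)
      simp only [hq, List.head_cons] at hih
      have hcons : pvD n = a :: (l ++ [Nat.digitChar (n % 10)]) := by
        rw [pvD_ge n (by omega), hq]; rfl
      simp only [hcons, List.head_cons]
      exact hih

-- repeated-block number: pvBN b k q has the digits of b repeated (q+1) times
def pvBN (b k : Nat) : Nat → Nat
  | 0 => b
  | q + 1 => pvBN b k q * 10 ^ k + b

theorem pvBN_ge (b k q : Nat) : b ≤ pvBN b k q := by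
  induction q with
  | zero => simp [pvBN]
  | succ q ih =>
    have h1 : 1 ≤ 10 ^ k := Nat.one_le_pow _ _ (by omega)
    show b ≤ pvBN b k q * 10 ^ k + b
    omega

theorem pvD_pvBN (b k : Nat) (q : Nat) (hk : 1 ≤ k) (h1 : 10 ^ (k - 1) ≤ b) (h2 : b < 10 ^ k) :
    pvD (pvBN b k q) = (List.replicate (q + 1) (pvD b)).flatten := by
  have hb1 : 1 ≤ b := le_trans (Nat.one_le_pow _ _ (by omega)) h1
  induction q with
  | zero => simp [pvBN]
  | succ q ih =>
    show pvD (pvBN b k q * 10 ^ k + b) = _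
    rw [pvD_append (pvBN b k q) b k (le_trans hb1 (pvBN_ge b k q)) hk h1 h2, ih,
      List.replicate_succ' (n := q + 1)]
    simp

theorem pvD_length_pvBN (b k q : Nat) (hk : 1 ≤ k) (h1 : 10 ^ (k - 1) ≤ b) (h2 : b < 10 ^ k) :
    (pvD (pvBN b k q)).length = (q + 1) * k := by
  rw [pvD_pvBN b k q hk h1 h2]
  simp [List.length_flatten, pvD_length_eq b k hk h1 h2, Nat.mul_comm]

-- the Int loop 'for _ in range(reps-1): n = n*shift + b' is pvBN
theorem foldl_mul_add (l : List Int) (s b : Int) (a : Int) :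
    l.foldl (fun n _ => n * s + b) a = (fun n => n * s + b)^[l.length] a := by
  induction l generalizing a with
  | nil => rfl
  | cons x xs ih => simp [List.foldl_cons, ih, Function.iterate_succ_apply]

theorem iterate_eq_pvBN (b k : Nat) (q : Nat) :
    (fun n : Int => n * (10 : Int) ^ k + (b : Nat))^[q] (b : Nat) = (pvBN b k q : Int) := by
  induction q with
  | zero => rfl
  | succ q ih =>
    rw [Function.iterate_succ_apply', ih]
    show _ = ((pvBN b k q * 10 ^ k + b : Nat) : Int)
    push_cast
    ring

-- Set.ofList is a sublist of its input
theorem pvOfList_sublist {α : Type} [BEq α] [LawfulBEq α] (xs : List α) :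
    (PySem.Set.ofList xs).Sublist xs := by
  induction xs with
  | nil => simp [PySem.Set.ofList]
  | cons x xs ih =>
    rw [PySem.Set.ofList_cons]
    refine List.Sublist.cons₂ x ?_
    exact List.Sublist.trans (List.filter_sublist) ih

theorem pvNumDigits_eq (t : Int) (h : 0 < t) :
    pvNumDigits t = ((pvD t.toNat).length : Int) := by
  have hfd : PySem.Int.floordiv t 10 = t / 10 := PySem.Int.floordiv_eq_ediv_of_pos (by omega)
  induction ht : t.toNat using Nat.strong_induction_on generalizing t with
  | _ N ih =>
    rw [pvNumDigits]
    simp only [h, dif_pos]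
    by_cases h10 : t < 10
    · have : PySem.Int.floordiv t 10 = 0 := by rw [hfd]; omega
      rw [this, pvNumDigits]
      simp only [show ¬ (0:Int) < 0 by omega, dif_neg, not_false_iff]
      rw [← ht] at *
      rw [pvD_lt t.toNat (by omega)]
      simp
    · have hq : 0 < t / 10 := by omega
      have := ih (t / 10).toNat (by omega) (t / 10) hq
        (PySem.Int.floordiv_eq_ediv_of_pos (by omega)) rfl
      rw [hfd, this]
      subst ht
      have htn : (t / 10).toNat = t.toNat / 10 := by omega
      rw [htn, pvD_ge t.toNat (by omega)]
      simp

def pvPA (id : Int) : Bool :=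
  (PySem.List.pyRange 1 (PySem.Int.floordiv (PySem.List.len (PySem.Int.toChars id)) 2 + 1) 1).any
    (fun seq_length => determine_invalid_id id seq_length)

theorem A_eq_filter (rp : Int × Int) :
    get_invalid_ids_from_range_second_part rp =
      (PySem.List.pyRange rp.1 (rp.2 + 1) 1).filter pvPA := by
  have key := PySem.List.foldl_if_eq_foldl_filter pvPA PySem.Set.add
    (PySem.List.pyRange rp.1 (rp.2 + 1) 1) PySem.Set.empty
  rw [show (PySem.Set.empty : PySem.Set Int) = [] from rfl,
    ← PySem.Set.ofList_eq_foldl,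
    PySem.Set.ofList_eq_self_of_nodup _ ((PySem.List.nodup_pyRange_one _ _).filter _)] at key
  exact key

theorem determine_iff (n : Int) (k : Nat) (hk : 1 ≤ k) :
    (determine_invalid_id n (k : Int) = true) ↔
      ((PySem.Int.toChars n).length % k = 0 ∧
       (List.replicate ((PySem.Int.toChars n).length / k) ((PySem.Int.toChars n).take k)).flatten
         = PySem.Int.toChars n ∧
       PySem.Chars.startswith ((PySem.Int.toChars n).take k) ['0'] = false) := by
  unfold determine_invalid_id
  simp only [PySem.List.len_eq, PySem.Int.mod_natCast, PySem.List.slice_to_natCast,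
    PySem.Int.floordiv_natCast, PySem.List.pyRepeat, Int.toNat_natCast]
  by_cases hmod : (PySem.Int.toChars n).length % k = 0
  · simp [hmod]
  · simp [hmod]
    intro h
    have := Int.natCast_dvd_natCast.mp h
    exact absurd (Nat.mod_eq_zero_of_dvd this) hmod

def pvRepForm (n : Int) : Prop :=
  ∃ k q b : Nat, 1 ≤ k ∧ 1 ≤ q ∧ 10 ^ (k - 1) ≤ b ∧ b < 10 ^ k ∧ n = (pvBN b k q : Int)

theorem startswith_zero_iff (seq : List Char) (h : seq ≠ []) :
    PySem.Chars.startswith seq ['0'] = false ↔ seq.head h ≠ '0' := by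
  cases seq with
  | nil => simp at h
  | cons a l =>
    simp [PySem.Chars.startswith, List.isPrefixOf, List.head_cons]
    constructor
    · intro hh he; exact absurd (by rw [he]) hh
    · intro hh he; exact hh (by simpa [eq_comm] using he)

theorem count_flatten_replicate (q : Nat) (xs : List Char) (c : Char) :
    ((List.replicate q xs).flatten.count c) = q * xs.count c := by
  induction q with
  | zero => simp
  | succ q ih =>
    rw [List.replicate_succ, List.flatten_cons, List.count_append, ih]
    ring

theorem pvPA_iff (n : Int) : pvPA n = true ↔ pvRepForm n := by
  unfold pvPA
  rw [List.any_eq_true]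
  have hfd : PySem.Int.floordiv (PySem.List.len (PySem.Int.toChars n)) 2 =
      (((PySem.Int.toChars n).length / 2 : Nat) : Int) := by
    rw [PySem.List.len_eq, PySem.Int.floordiv_eq_ediv_of_pos (by norm_num)]
    omega
  constructor
  · rintro ⟨sl, hmem, hdet⟩
    rw [hfd, PySem.List.mem_pyRange_one] at hmem
    obtain ⟨h1, h2⟩ := hmem
    have hsl : sl = (sl.toNat : Int) := by omega
    generalize hks : sl.toNat = k at hsl
    have hk1 : 1 ≤ k := by omega
    rw [hsl, determine_iff n k hk1] at hdet
    obtain ⟨hmod, hrep, hsw⟩ := hdet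
    have hk2 : 2 * k ≤ (PySem.Int.toChars n).length := by omega
    have hq2 : 2 ≤ (PySem.Int.toChars n).length / k :=
      Nat.le_div_iff_mul_le (by omega) |>.mpr (by omega)
    have hseqlen : ((PySem.Int.toChars n).take k).length = k := by
      rw [List.length_take]; omega
    rcases Int.lt_or_le n 0 with hneg | hpos
    · exfalso
      have hcons : PySem.Int.toChars n = '-' :: pvD n.natAbs := toChars_neg n hneg
      have hnd : ('-' : Char) ∉ pvD n.natAbs := by
        intro hm
        exact absurd (isdig_bounds _ (pvD_all_dig _ _ hm)) (by decide)
      have hcount1 : (PySem.Int.toChars n).count '-' = 1 := by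
        rw [hcons, List.count_cons_self, List.count_eq_zero.mpr hnd]
      obtain ⟨j, hj⟩ : ∃ j, k = j + 1 := ⟨k - 1, by omega⟩
      have hmemseq : ('-' : Char) ∈ (PySem.Int.toChars n).take k := by
        rw [hcons, hj, List.take_succ_cons]
        exact List.mem_cons_self
      have hcount2 : 2 ≤ (PySem.Int.toChars n).count '-' := by
        conv_rhs => rw [← hrep]
        rw [count_flatten_replicate]
        have h1c : 1 ≤ ((PySem.Int.toChars n).take k).count '-' :=
          List.one_le_count_iff.mpr hmemseq
        nlinarith
      omega
    · have hcsD : PySem.Int.toChars n = pvD n.toNat := toChars_eq_pvD n hpos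
      rw [hcsD] at hrep hsw hk2 hq2 hseqlen
      have halldig : ∀ c ∈ (pvD n.toNat).take k, pvIsDig c := fun c hc =>
        pvD_all_dig n.toNat c (List.mem_of_mem_take hc)
      have hseqne : (pvD n.toNat).take k ≠ [] := by
        intro hh; rw [hh] at hseqlen; simp at hseqlen; omega
      have hhead := (startswith_zero_iff _ hseqne).mp hsw
      have hb2 : pvV ((pvD n.toNat).take k) < 10 ^ k := by
        have := pvV_lt _ halldig
        rw [hseqlen] at this
        exact this
      have hb1 : 10 ^ (k - 1) ≤ pvV ((pvD n.toNat).take k) := by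
        have := pvV_ge _ hseqne halldig hhead
        rw [hseqlen] at this
        exact this
      have hDb : pvD (pvV ((pvD n.toNat).take k)) = (pvD n.toNat).take k :=
        pvD_pvV _ hseqne halldig hhead
      refine ⟨k, (pvD n.toNat).length / k - 1, pvV ((pvD n.toNat).take k), hk1, by omega,
        hb1, hb2, ?_⟩
      have hflat : pvD n.toNat = pvD (pvBN (pvV ((pvD n.toNat).take k)) k
          ((pvD n.toNat).length / k - 1)) := by
        rw [pvD_pvBN _ k _ hk1 hb1 hb2, hDb]
        have heq : (pvD n.toNat).length / k - 1 + 1 = (pvD n.toNat).length / k := by omega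
        rw [heq, hrep]
      have := pvD_inj _ _ hflat
      omega
  · rintro ⟨k, q, b, hk1, hq1, hb1, hb2, hn⟩
    have hb0 : 1 ≤ b := le_trans (Nat.one_le_pow _ _ (by omega)) hb1
    have hpos : 0 ≤ n := by rw [hn]; positivity
    have hcsD : PySem.Int.toChars n = pvD (pvBN b k q) := by
      rw [toChars_eq_pvD n hpos]
      congr 1
      omega
    have hLc : (PySem.Int.toChars n).length = (q + 1) * k := by
      rw [hcsD]; exact pvD_length_pvBN b k q hk1 hb1 hb2
    have hkD : (pvD b).length = k := pvD_length_eq b k hk1 hb1 hb2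
    refine ⟨(k : Int), ?_, ?_⟩
    · rw [hfd, PySem.List.mem_pyRange_one]
      refine ⟨by omega, ?_⟩
      have h2k : 2 * k ≤ (q + 1) * k := by nlinarith
      rw [hLc]
      omega
    · rw [determine_iff n k hk1]
      have htake : (PySem.Int.toChars n).take k = pvD b := by
        rw [hcsD, pvD_pvBN b k q hk1 hb1 hb2, List.replicate_succ]
        rw [List.flatten_cons, ← hkD]
        exact List.take_left
      refine ⟨by rw [hLc]; simp, ?_, ?_⟩
      · rw [htake, hLc, Nat.mul_div_cancel _ (by omega : 0 < k), hcsD,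
          pvD_pvBN b k q hk1 hb1 hb2]
      · rw [htake, startswith_zero_iff (pvD b) (pvD_ne_nil b)]
        exact pvD_head_ne_zero b hb0

theorem foldl_acc_append {α β : Type} (f : List β → α → List β) (g : α → List β)
    (hf : ∀ acc x, f acc x = acc ++ g x) (l : List α) (acc : List β) :
    l.foldl f acc = acc ++ l.flatMap g := by
  have hfe : f = fun acc x => acc ++ g x := funext fun a => funext fun x => hf a x
  rw [hfe, PySem.List.foldl_append_eq_flatMap]

def pvN (rp : Int × Int) (L k b : Int) : Int :=
  (PySem.List.pyRange 0 (PySem.Int.floordiv L k - 1) 1).foldl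
    (fun n _ => n * (10 : Int) ^ k.toNat + b) b

def pvG2 (rp : Int × Int) (L k : Int) : List Int :=
  if PySem.Int.mod L k ≠ 0 then []
  else
    ((PySem.List.pyRange ((10 : Int) ^ (k - 1).toNat) ((10 : Int) ^ k.toNat) 1).filter
      (fun b => decide (rp.1 ≤ pvN rp L k b ∧ pvN rp L k b ≤ rp.2))).map (pvN rp L k)

def pvG1 (rp : Int × Int) (L : Int) : List Int :=
  (PySem.List.pyRange 1 (PySem.Int.floordiv L 2 + 1) 1).flatMap (pvG2 rp L)

theorem flatMap_ite_singleton {α β : Type} (p : α → Prop) [DecidablePred p] (f : α → β)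
    (l : List α) :
    l.flatMap (fun x => if p x then [f x] else []) = (l.filter (fun x => decide (p x))).map f := by
  induction l with
  | nil => rfl
  | cons x xs ih => by_cases h : p x <;> simp [h, ih]

theorem B_eq (rp : Int × Int) :
    get_invalid_ids_from_range_second_part_alt rp =
      PySem.Set.ofList (PySem.List.sorted
        ((PySem.List.pyRange 2 (pvNumDigits rp.2 + 1) 1).flatMap (pvG1 rp)) (fun x => x)) := by
  unfold get_invalid_ids_from_range_second_part_alt
  simp only []
  congr 2
  rw [foldl_acc_append _ (pvG1 rp) ?_ _ []]
  · simp
  · intro acc L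
    rw [foldl_acc_append _ (pvG2 rp L) ?_ _ acc]
    · rfl
    · intro acc2 k
      by_cases hm : PySem.Int.mod L k ≠ 0
      · rw [if_pos hm]
        simp [pvG2, hm]
      · rw [if_neg hm]
        rw [foldl_acc_append _
          (fun b => if rp.1 ≤ pvN rp L k b ∧ pvN rp L k b ≤ rp.2 then [pvN rp L k b] else [])
          ?_ _ acc2]
        · simp [pvG2, hm, flatMap_ite_singleton]
        · intro acc3 b
          by_cases hb : rp.1 ≤ pvN rp L k b ∧ pvN rp L k b ≤ rp.2
          · show (if rp.1 ≤ pvN rp L k b ∧ pvN rp L k b ≤ rp.2 then acc3 ++ [pvN rp L k b] else acc3) = _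
            simp [hb]
          · show (if rp.1 ≤ pvN rp L k b ∧ pvN rp L k b ≤ rp.2 then acc3 ++ [pvN rp L k b] else acc3) = _
            simp [hb]

theorem pvN_eq (rp : Int × Int) (Ln kn b : Nat) :
    pvN rp (Ln : Int) (kn : Int) (b : Nat) = ((pvBN b kn (Ln / kn - 1) : Nat) : Int) := by
  unfold pvN
  rw [PySem.Int.floordiv_natCast, foldl_mul_add, PySem.List.length_pyRange_one]
  have h2 : (((Ln / kn : Nat) : Int) - 1 - 0).toNat = Ln / kn - 1 := by omega
  rw [h2]
  have h3 : ((kn : Int)).toNat = kn := by omega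
  rw [h3, iterate_eq_pvBN]

theorem B_mem (rp : Int × Int) (n : Int) :
    n ∈ get_invalid_ids_from_range_second_part_alt rp ↔
      rp.1 ≤ n ∧ n ≤ rp.2 ∧ pvRepForm n := by
  rw [B_eq rp, PySem.Set.mem_ofList, PySem.List.mem_sorted, List.mem_flatMap]
  constructor
  · rintro ⟨L, hLmem, hn⟩
    rw [PySem.List.mem_pyRange_one] at hLmem
    unfold pvG1 at hn
    rw [List.mem_flatMap] at hn
    obtain ⟨k, hkmem, hn⟩ := hn
    rw [PySem.List.mem_pyRange_one] at hkmem
    unfold pvG2 at hn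
    by_cases hm : PySem.Int.mod L k ≠ 0
    · rw [if_pos hm] at hn; simp at hn
    · rw [if_neg hm] at hn
      rw [List.mem_map] at hn
      obtain ⟨b, hbmem, hnb⟩ := hn
      rw [List.mem_filter] at hbmem
      obtain ⟨hbr, hcond⟩ := hbmem
      rw [PySem.List.mem_pyRange_one] at hbr
      simp only [decide_eq_true_eq] at hcond
      -- convert to Nat
      have hk1 : 1 ≤ k := hkmem.1
      have hL2 : 2 ≤ L := hLmem.1
      have hkc : k = (k.toNat : Int) := by omega
      have hLc : L = (L.toNat : Int) := by omega
      have hbpos : 0 < (10:Int) ^ (k-1).toNat := by positivity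
      have hbc : b = (b.toNat : Int) := by omega
      have hmod : k.toNat ∣ L.toNat := by
        rw [not_not] at hm
        rw [hkc, hLc, PySem.Int.mod_natCast] at hm
        exact (Nat.dvd_iff_mod_eq_zero).mpr (by exact_mod_cast hm)
      have hq2 : 2 ≤ L.toNat / k.toNat := by
        have hk2 : k ≤ PySem.Int.floordiv L 2 := by omega
        rw [PySem.Int.floordiv_eq_ediv_of_pos (by norm_num)] at hk2
        have : 2 * k.toNat ≤ L.toNat := by omega
        exact Nat.le_div_iff_mul_le (by omega) |>.mpr (by omega)
      have hnval : n = ((pvBN b.toNat k.toNat (L.toNat / k.toNat - 1) : Nat) : Int) := by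
        rw [← hnb, hbc, hkc, hLc, pvN_eq]
        congr 2 <;> omega
      have hdecb : 10 ^ (k.toNat - 1) ≤ b.toNat ∧ b.toNat < 10 ^ k.toNat := by
        constructor
        · have := hbr.1
          rw [hkc] at this
          have hcast : ((10:Nat) ^ (k.toNat - 1) : Int) = (10:Int) ^ ((k:Int) - 1).toNat := by
            rw [hkc]
            push_cast
            congr 1
            omega
          omega
        · have := hbr.2
          have hcast : ((10:Nat) ^ k.toNat : Int) = (10:Int) ^ ((k:Int)).toNat := by
            push_cast
            congr 1
          omega
      refine ⟨by omega, by omega, k.toNat, L.toNat / k.toNat - 1, b.toNat,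
        by omega, by omega, hdecb.1, hdecb.2, hnval⟩
  · rintro ⟨hge, hle, k, q, b, hk1, hq1, hb1, hb2, hn⟩
    have hb0 : 1 ≤ b := le_trans (Nat.one_le_pow _ _ (by omega)) hb1
    have hnpos : 1 ≤ n := by
      rw [hn]
      have := pvBN_ge b k q
      omega
    have he1 : 1 ≤ rp.2 := le_trans hnpos hle
    have hmaxlen : pvNumDigits rp.2 = ((pvD rp.2.toNat).length : Int) :=
      pvNumDigits_eq rp.2 (by omega)
    have hnlen : (pvD n.toNat).length = (q + 1) * k := by
      have : n.toNat = pvBN b k q := by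
        have := pvBN_ge b k q
        omega
      rw [this]
      exact pvD_length_pvBN b k q hk1 hb1 hb2
    have hmono : (pvD n.toNat).length ≤ (pvD rp.2.toNat).length :=
      pvD_length_mono n.toNat rp.2.toNat (by omega) (by omega)
    refine ⟨(((q + 1) * k : Nat) : Int), ?_, ?_⟩
    · rw [PySem.List.mem_pyRange_one]
      constructor
      · have : 2 ≤ (q + 1) * k := by nlinarith
        omega
      · rw [hmaxlen]
        have : (q + 1) * k ≤ (pvD rp.2.toNat).length := by omega
        omega
    · unfold pvG1
      rw [List.mem_flatMap]
      refine ⟨(k : Int), ?_, ?_⟩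
      · rw [PySem.List.mem_pyRange_one]
        refine ⟨by omega, ?_⟩
        rw [PySem.Int.floordiv_eq_ediv_of_pos (by norm_num)]
        have : 2 * k ≤ (q + 1) * k := by nlinarith
        omega
      · unfold pvG2
        have hmz : PySem.Int.mod (((q + 1) * k : Nat) : Int) (k : Int) = 0 := by
          rw [PySem.Int.mod_natCast]
          simp
        rw [if_neg (by push_cast at hmz ⊢; simp [hmz])]
        rw [List.mem_map]
        refine ⟨(b : Nat), ?_, ?_⟩
        · rw [List.mem_filter, PySem.List.mem_pyRange_one]
          have hc1 : (10:Int) ^ (((k : Int)) - 1).toNat = ((10 ^ (k - 1) : Nat) : Int) := by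
            push_cast
            congr 1
            omega
          have hc2 : (10:Int) ^ (((k : Int))).toNat = ((10 ^ k : Nat) : Int) := by
            push_cast
            congr 1
          have hnv : pvN rp (((q + 1) * k : Nat) : Int) (k : Int) (b : Nat) = n := by
            rw [pvN_eq, hn]
            congr 2
            rw [Nat.mul_div_cancel _ (by omega : 0 < k)]
            omega
          refine ⟨⟨by omega, by omega⟩, ?_⟩
          simp only [decide_eq_true_eq, hnv]
          exact ⟨hge, hle⟩
        · rw [pvN_eq, hn]
          congr 2
          rw [Nat.mul_div_cancel _ (by omega : 0 < k)]
          omega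

theorem A_mem (rp : Int × Int) (n : Int) :
    n ∈ get_invalid_ids_from_range_second_part rp ↔
      rp.1 ≤ n ∧ n ≤ rp.2 ∧ pvRepForm n := by
  rw [A_eq_filter, List.mem_filter, PySem.List.mem_pyRange_one, pvPA_iff]
  constructor
  · rintro ⟨⟨h1, h2⟩, h3⟩
    exact ⟨h1, by omega, h3⟩
  · rintro ⟨h1, h2, h3⟩
    exact ⟨⟨h1, by omega⟩, h3⟩

theorem AB_eq (rp : Int × Int) :
    get_invalid_ids_from_range_second_part rp = get_invalid_ids_from_range_second_part_alt rp := by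
  have hA_pairwise : List.Pairwise (fun a b : Int => a < b)
      (get_invalid_ids_from_range_second_part rp) := by
    rw [A_eq_filter]
    exact (PySem.List.pairwise_lt_pyRange_one _ _).filter _
  have hB_pairwise : List.Pairwise (fun a b : Int => a ≤ b)
      (get_invalid_ids_from_range_second_part_alt rp) := by
    rw [B_eq]
    exact List.Pairwise.sublist (pvOfList_sublist _) (PySem.List.sorted_pairwise _ _)
  have hA_nodup : (get_invalid_ids_from_range_second_part rp).Nodup :=
    hA_pairwise.imp (fun h => ne_of_lt h)
  have hB_nodup : (get_invalid_ids_from_range_second_part_alt rp).Nodup := by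
    rw [B_eq]
    exact PySem.Set.nodup_ofList _
  have hperm : (get_invalid_ids_from_range_second_part_alt rp).Perm
      (get_invalid_ids_from_range_second_part rp) :=
    (List.perm_ext_iff_of_nodup hB_nodup hA_nodup).mpr
      (fun a => (B_mem rp a).trans (A_mem rp a).symm)
  exact (PySem.List.eq_of_perm_of_pairwise_le_of_pairwise_lt (fun x : Int => x)
    hperm hB_pairwise hA_pairwise).symm

-- ===== VERDICT (by name: the statement is the Claim_ definition above) =====
theorem get_invalid_ids_from_range_second_part_spec : Claim_equal_get_invalid_ids_from_range_second_part := by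
  intro range_pair _hdom
  unfold Spec_get_invalid_ids_from_range_second_part
  exact AB_eq range_pair
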